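-- pv_equiv track=rewrite | github.com/amir4v/All-English-Words | A1-C2/pure/memorizing-letter-wise/app/first_letter.py | _letterize
-- ===== SOURCE A (Python) =====
-- import string
--
-- lower_chars = string.ascii_lowercase
--
-- def _letterize(text):
--     text = text.lower()
--     text = text.replace('\n', ' ')
--     text = text.title()
--     words = text.split(' ')
--
--     results = []
--     for word in words:
--         word = word.replace('\n', ' ').strip(' ').strip('\n')
--         org_word = word
--         for c in lower_chars:
--             word = word.replace(c, '')
--         word = word.lower().replace('\n', ' ').strip(' ').strip('\n')
--         results.append((word, org_word))
--     return results
-- ===== SOURCE B (Python) =====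
-- # B: replaces the 26 repeated full-string replace() scans per word by a single
-- # membership-filtering pass, and builds the result with a comprehension.
-- import string
--
-- lower_chars = string.ascii_lowercase
--
--
-- def _clean(word):
--     return word.replace('\n', ' ').strip(' ').strip('\n')
--
--
-- def _caps(word):
--     letters = ''.join(ch for ch in word if ch not in lower_chars)
--     return letters.lower().replace('\n', ' ').strip(' ').strip('\n')
--
--
-- def _letterize(text):
--     text = text.lower().replace('\n', ' ').title()
--     return [(_caps(w), w) for w in map(_clean, text.split(' '))]
-- ===== Notes on version B (the rewrite author's own statement) =====
-- stated objective: idiomatic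
-- what changed: The inner loop of 26 full-string replace() passes per word is replaced by one membership-filtering pass (''.join with 'ch not in lower_chars'), and the result list is built by a comprehension over map(_clean, ...) instead of an accumulator loop.
import Mathlib
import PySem

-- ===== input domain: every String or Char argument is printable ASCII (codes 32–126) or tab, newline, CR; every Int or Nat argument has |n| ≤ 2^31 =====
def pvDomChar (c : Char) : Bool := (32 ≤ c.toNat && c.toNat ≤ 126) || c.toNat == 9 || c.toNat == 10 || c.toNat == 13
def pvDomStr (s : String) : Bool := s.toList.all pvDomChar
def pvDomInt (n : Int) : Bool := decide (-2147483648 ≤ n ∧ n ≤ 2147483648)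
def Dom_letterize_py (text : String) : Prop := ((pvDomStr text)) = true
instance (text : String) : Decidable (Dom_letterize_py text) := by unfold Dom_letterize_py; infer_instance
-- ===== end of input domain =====

-- B replaces A's 26 repeated per-word replace() scans by one membership-filtering pass and
-- builds the result by a map instead of an accumulator loop; return values are identical.

-- string.ascii_lowercase
def lowerCharsPy : String := "abcdefghijklmnopqrstuvwxyz"

-- hand port of Python's str.title() (exact on ASCII, where 'cased' = alphabetic):
-- a letter is uppercased after a non-cased character, lowercased after a cased one.
def pyTitleGo : Bool → List Char → List Char
  | _, [] => []
  | prev, c :: t =>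
    (if PySem.Chars.isalpha c then
        (if prev then PySem.Chars.lowerChar c else PySem.Chars.upperChar c)
      else c) :: pyTitleGo (PySem.Chars.isalpha c) t

def pyTitle (s : String) : String := String.ofList (pyTitleGo false s.toList)

-- ===== PORT A =====
def letterize_py (text : String) : List (String × String) :=
  let t1 := PySem.Str.lower text
  let t2 := PySem.Str.replace t1 "\n" " "
  let t3 := pyTitle t2
  let words := (PySem.Str.split? t3 " ").getD []
  words.foldl (fun results word =>
    let w1 := PySem.Str.stripChars (PySem.Str.stripChars (PySem.Str.replace word "\n" " ") " ") "\n"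
    let orgWord := w1
    let w2 := lowerCharsPy.toList.foldl (fun w c => PySem.Str.replace w (String.ofList [c]) "") w1
    let w3 := PySem.Str.stripChars (PySem.Str.stripChars (PySem.Str.replace (PySem.Str.lower w2) "\n" " ") " ") "\n"
    results ++ [(w3, orgWord)]) []

-- ===== PORT B =====
-- Source B: _clean
def letterize_clean (word : String) : String :=
  PySem.Str.stripChars (PySem.Str.stripChars (PySem.Str.replace word "\n" " ") " ") "\n"

-- Source B: _caps (''.join of the chars not in lower_chars, then lower/replace/strip)
def letterize_caps (word : String) : String :=
  let letters := String.ofList (word.toList.filter (fun ch => !(PySem.Chars.isIn [ch] lowerCharsPy.toList)))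
  PySem.Str.stripChars (PySem.Str.stripChars (PySem.Str.replace (PySem.Str.lower letters) "\n" " ") " ") "\n"

def letterize_py_alt (text : String) : List (String × String) :=
  let t := pyTitle (PySem.Str.replace (PySem.Str.lower text) "\n" " ")
  (((PySem.Str.split? t " ").getD []).map letterize_clean).map (fun w => (letterize_caps w, w))

-- ===== PRECONDITION & SPEC =====
def Spec_letterize_py (text : String) (out : List (String × String)) : Prop := out = letterize_py_alt text
instance (text : String) (out : List (String × String)) : Decidable (Spec_letterize_py text out) := by unfold Spec_letterize_py; infer_instance

-- ===== CLAIM (what is proved, stated in full; the proofs are below) =====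
def Claim_equal_letterize_py : Prop := ∀ (text : String), Dom_letterize_py text → Spec_letterize_py text (letterize_py text)

-- ===== LEMMAS AND PROOFS =====

theorem go_single (c : Char) : ∀ (fuel : Nat) (l acc : List Char), l.length ≤ fuel →
    PySem.Chars.replace.go [c] [] fuel l acc = acc.reverse ++ l.filter (fun x => x != c) := by
  intro fuel
  induction fuel with
  | zero => intro l acc h; simp at h; subst h; simp [PySem.Chars.replace.go]
  | succ n ih =>
    intro l acc h
    cases l with
    | nil => simp [PySem.Chars.replace.go]
    | cons a t =>
      simp only [PySem.Chars.replace.go]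
      by_cases hac : a = c
      · subst hac
        have : List.isPrefixOf [a] (a :: t) = true := by simp [List.isPrefixOf]
        rw [if_pos this]
        simp only [List.length_cons] at h
        simp only [List.length_singleton, List.drop_one, List.tail_cons, List.reverse_nil,
          List.nil_append]
        rw [ih _ _ (by omega)]
        simp
      · have : List.isPrefixOf [c] (a :: t) = false := by
          simp [List.isPrefixOf]; exact fun h => absurd h.symm hac
        rw [if_neg (by simp [this])]
        simp only [List.length_cons] at h
        rw [ih _ _ (by omega)]
        simp [hac]

theorem replace_single (c : Char) (s : List Char) :
    PySem.Chars.replace s [c] [] = s.filter (fun x => x != c) := by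
  rw [PySem.Chars.replace]
  simp [go_single c s.length s [] le_rfl]

theorem isIn_singleton (a : Char) (l : List Char) :
    PySem.Chars.isIn [a] l = l.contains a := by
  rw [Bool.eq_iff_iff, PySem.Chars.isIn_iff_infix, List.contains_iff_mem]
  constructor
  · intro h; exact h.mem (by simp)
  · intro h; obtain ⟨s, t, rfl⟩ := List.append_of_mem h; exact ⟨s, t, by simp⟩

theorem foldl_replace_eq_filter (L : List Char) (w : String) :
    L.foldl (fun s c => PySem.Str.replace s (String.ofList [c]) "") w
      = String.ofList (w.toList.filter (fun ch => !(L.contains ch))) := by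
  induction L generalizing w with
  | nil => simp
  | cons c L ih =>
    simp only [List.foldl_cons]
    rw [ih]
    congr 1
    have htl : (PySem.Str.replace w (String.ofList [c]) "").toList
        = w.toList.filter (fun x => x != c) := by
      rw [PySem.Str.toList_replace]
      simp [replace_single]
    rw [htl, List.filter_filter]
    apply List.filter_congr
    intro ch _
    simp [bne, beq_eq_decide, Bool.and_comm]

theorem foldl_concat_eq_map {α β : Type} (f : α → β) (l : List α) :
    ∀ acc : List β, l.foldl (fun r x => r ++ [f x]) acc = acc ++ l.map f := by
  induction l with
  | nil => simp
  | cons a t ih => intro acc; simp [ih]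

-- ===== VERDICT (by name: the statement is the Claim_ definition above) =====
theorem letterize_py_spec : Claim_equal_letterize_py := by
  intro text _
  unfold Spec_letterize_py letterize_py letterize_py_alt
  rw [foldl_concat_eq_map, List.map_map, List.nil_append]
  apply List.map_congr_left
  intro word _
  simp only [Function.comp, letterize_clean, letterize_caps]
  rw [foldl_replace_eq_filter]
  have hpred : ∀ l : List Char, l.filter (fun ch => !(PySem.Chars.isIn [ch] lowerCharsPy.toList))
      = l.filter (fun ch => !(lowerCharsPy.toList.contains ch)) :=
    fun l => List.filter_congr (by intro ch _; rw [isIn_singleton])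
  rw [hpred]
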